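-- pv_equiv track=rewrite | github.com/markurti/lfdc | lab5/scanner.py | recognize
-- ===== SOURCE A (Python) =====
-- def recognize(string):
--     if not string:
--         return False
--
--     # Special case: standalone "0"
--     if string == "0":
--         return True
--
--     # Check for optional minus sign
--     start_idx = 0
--     if string[0] == '-':
--         if len(string) == 1:  # just "-"
--             return False
--         start_idx = 1
--
--     # First digit after optional minus must be non-zero
--     if string[start_idx] not in '123456789':
--         return False
--
--     # Rest must be digits
--     for char in string[start_idx + 1:]:
--         if not char.isdigit():
--             return False
--
--     return True
-- ===== SOURCE B (Python) =====
-- def recognize(string):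
--     if not string:
--         return False
--     # finite-state machine: one pass, explicit state transitions
--     START, SIGN, ZERO, ACC, DEAD = 0, 1, 2, 3, 4
--     state = START
--     for ch in string:
--         if state == START:
--             if ch == '-':
--                 state = SIGN
--             elif ch == '0':
--                 state = ZERO
--             elif ch in '123456789':
--                 state = ACC
--             else:
--                 state = DEAD
--         elif state == SIGN:
--             state = ACC if ch in '123456789' else DEAD
--         elif state == ACC:
--             state = ACC if ch.isdigit() else DEAD
--         else:  # ZERO (accepting only as final state) or DEAD
--             state = DEAD
--     return state == ACC or state == ZERO
-- ===== Notes on version B (the rewrite author's own statement) =====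
-- stated objective: alternative
-- what changed: Replaced the guard-chain with indexing/slicing by an explicit finite-state-machine scanner that makes a single uniform pass over the characters, tracking states START/SIGN/ZERO/ACC/DEAD.
import Mathlib
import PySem

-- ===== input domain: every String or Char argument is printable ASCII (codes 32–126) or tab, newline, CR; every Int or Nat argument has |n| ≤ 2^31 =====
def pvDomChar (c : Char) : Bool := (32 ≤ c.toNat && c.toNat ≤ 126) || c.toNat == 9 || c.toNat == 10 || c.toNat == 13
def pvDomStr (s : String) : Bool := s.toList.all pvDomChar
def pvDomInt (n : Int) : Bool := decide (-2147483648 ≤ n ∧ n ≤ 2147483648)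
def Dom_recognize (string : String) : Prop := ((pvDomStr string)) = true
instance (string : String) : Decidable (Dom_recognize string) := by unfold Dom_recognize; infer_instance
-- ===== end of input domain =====

-- B is an explicit finite-state-machine scanner (one uniform pass) instead of A's guard chain with indexing and slicing; same cost, different decomposition.

-- ===== PORT A =====
-- literal transliteration of A; string[start_idx] is always in range where it is read, so pyGetD is exact there
def recognize (string : String) : Bool :=
  let cs := string.toList
  if cs = [] then false
  else if cs = ['0'] then true
  else
    if PySem.List.pyGet? cs 0 = some '-' ∧ cs.length = 1 then false
    else
      let startIdx : Int := if PySem.List.pyGet? cs 0 = some '-' then 1 else 0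
      if (PySem.List.pyGetD cs startIdx ' ') ∈ ['1','2','3','4','5','6','7','8','9'] then
        -- for char in string[start_idx+1:]: if not char.isdigit(): return False / return True
        (PySem.List.slice cs (some (startIdx + 1)) none).all PySem.Chars.isdigit
      else false

-- ===== PORT B =====
inductive PvSt | start | sign | zero | acc | dead
deriving DecidableEq, Repr

def pvStep (st : PvSt) (ch : Char) : PvSt :=
  match st with
  | .start =>
      if ch = '-' then .sign
      else if ch = '0' then .zero
      else if ch ∈ ['1','2','3','4','5','6','7','8','9'] then .acc
      else .dead
  | .sign => if ch ∈ ['1','2','3','4','5','6','7','8','9'] then .acc else .dead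
  | .acc => if PySem.Chars.isdigit ch then .acc else .dead
  | _ => .dead   -- ZERO is accepting only as the final state; DEAD is absorbing

def recognize_alt (string : String) : Bool :=
  let cs := string.toList
  if cs = [] then false
  else
    let final := cs.foldl pvStep .start
    final = .acc || final = .zero

-- ===== PRECONDITION & SPEC =====
def Spec_recognize (string : String) (out : Bool) : Prop := out = recognize_alt string
instance (string : String) (out : Bool) : Decidable (Spec_recognize string out) := by unfold Spec_recognize; infer_instance

-- ===== CLAIM (what is proved, stated in full; the proofs are below) =====
def Claim_equal_recognize : Prop := ∀ (string : String), Dom_recognize string → Spec_recognize string (recognize string)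

-- ===== LEMMAS AND PROOFS =====
theorem pvStep_dead (cs : List Char) : cs.foldl pvStep .dead = .dead := by
  induction cs with
  | nil => rfl
  | cons c rest ih => simpa [pvStep] using ih

theorem pvStep_acc (cs : List Char) :
    cs.foldl pvStep .acc = if cs.all PySem.Chars.isdigit then .acc else .dead := by
  induction cs with
  | nil => rfl
  | cons c rest ih =>
    by_cases h : PySem.Chars.isdigit c = true
    · simp [pvStep, h, ih]
    · simp [pvStep, h, pvStep_dead]

-- slice facts used by the A-side branches: string[1:] and string[2:]
theorem pv_slice1 {x : Char} {r : List Char} : PySem.List.slice (x::r) (some 1) none = r := by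
  simp [PySem.List.slice_some_none, PySem.List.clampIdx]
theorem pv_slice2 {x y : Char} {r : List Char} : PySem.List.slice (x::y::r) (some 2) none = r := by
  simp [PySem.List.slice_some_none, PySem.List.clampIdx]

-- index fact used by the A-side branches: string[1] on a two-plus-char list
theorem pv_getD1 (c d : Char) (r : List Char) : PySem.List.pyGetD (c::d::r) 1 ' ' = d := by
  have := PySem.List.pyGetD_ofNat' (xs := c::d::r) (k := 1) (d := ' ')
  simp at this; simpa using this

theorem pv_main (s : String) (c : Char) (rest : List Char) (hs : s.toList = c :: rest) :
    recognize s = recognize_alt s := by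
  by_cases hm : c = '-'
  · subst hm
    cases rest with
    | nil => simp [recognize, recognize_alt, hs, pvStep]
    | cons d rest2 =>
      by_cases hd : d ∈ ['1','2','3','4','5','6','7','8','9']
      · simp [recognize, recognize_alt, hs, pvStep, hd, pvStep_acc, pv_getD1,
              PySem.List.pyGet?_zero_cons, pv_slice2]
        split <;> simp_all [List.all_eq]
      · simp [recognize, recognize_alt, hs, pvStep, hd, pvStep_dead, pv_getD1,
              PySem.List.pyGet?_zero_cons]
  · by_cases h0 : c = '0'
    · subst h0
      cases rest with
      | nil => simp [recognize, recognize_alt, hs, pvStep]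
      | cons d rest2 =>
        simp [recognize, recognize_alt, hs, pvStep, pvStep_dead,
              PySem.List.pyGetD_zero_cons]
    · by_cases hd : c ∈ ['1','2','3','4','5','6','7','8','9']
      · simp [recognize, recognize_alt, hs, pvStep, hd, hm, h0, pvStep_acc,
              PySem.List.pyGetD_zero_cons, pv_slice1]
        split <;> simp_all [List.all_eq]
      · have hne : ¬ (c :: rest = ['0']) := by simp [h0]
        simp [recognize, recognize_alt, hs, pvStep, hd, hm, h0, hne, pvStep_dead,
              PySem.List.pyGetD_zero_cons]

-- ===== VERDICT (by name: the statement is the Claim_ definition above) =====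
theorem recognize_spec : Claim_equal_recognize := by
  intro s _
  unfold Spec_recognize
  cases hs : s.toList with
  | nil => simp [recognize, recognize_alt, hs]
  | cons c rest => exact pv_main s c rest hs
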